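-- pv_equiv track=rewrite | github.com/MAYUR-thm/Security_file_processor | src/report_generator.py | _analyze_file_sizes
-- ===== SOURCE A (Python) =====
-- from typing import Dict, List, Optional, Union, Any
--
-- def _analyze_file_sizes(results: List[Dict[str, Any]]) -> Dict[str, int]:
--     """Analyze file size distribution."""
--     # This would require file size data
--     # For now, return placeholder data based on text length
--     sizes = {'small': 0, 'medium': 0, 'large': 0}
--
--     for result in results:
--         text_length = result.get('text_length', 0)
--         if text_length < 1000:
--             sizes['small'] += 1
--         elif text_length < 10000:
--             sizes['medium'] += 1
--         else:
--             sizes['large'] += 1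
--
--     return sizes
-- ===== SOURCE B (Python) =====
-- def _analyze_file_sizes(results):
--     """Analyze file size distribution (staged passes + complement)."""
--     lengths = [result.get('text_length', 0) for result in results]
--     small = sum(1 for n in lengths if n < 1000)
--     medium = sum(1 for n in lengths if 1000 <= n < 10000)
--     return {'small': small, 'medium': medium,
--             'large': len(lengths) - small - medium}
-- ===== Notes on version B (the rewrite author's own statement) =====
-- stated objective: simpler
-- what changed: Replaces the single pass with an if/elif/else ladder mutating a counter dict by staged passes: extract all lengths once, count the small and medium buckets with two filtered sums, and derive the large bucket arithmetically as the complement len - small - medium, building the result dict in one literal.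
import Mathlib
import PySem

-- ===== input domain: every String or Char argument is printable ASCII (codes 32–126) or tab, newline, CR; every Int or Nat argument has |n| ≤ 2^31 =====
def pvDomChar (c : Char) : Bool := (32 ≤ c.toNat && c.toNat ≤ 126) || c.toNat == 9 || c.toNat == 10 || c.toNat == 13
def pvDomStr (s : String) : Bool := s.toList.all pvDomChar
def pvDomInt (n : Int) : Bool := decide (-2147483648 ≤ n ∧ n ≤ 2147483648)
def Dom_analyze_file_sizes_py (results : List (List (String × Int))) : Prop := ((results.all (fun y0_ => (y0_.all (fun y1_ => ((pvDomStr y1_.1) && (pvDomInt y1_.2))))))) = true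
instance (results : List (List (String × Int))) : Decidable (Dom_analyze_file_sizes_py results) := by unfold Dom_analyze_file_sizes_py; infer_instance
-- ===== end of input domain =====

-- B replaces A's single-pass if/elif/else counter-dict loop by staged passes: extract all lengths once,
-- count small and medium with two filtered counts, derive large as len - small - medium; simpler, same cost.


-- ===== PORT A =====
-- sizes = {'small':0,'medium':0,'large':0}; for result: if/elif/else on text_length, += 1; return sizes
def analyze_file_sizes_py (results : List (List (String × Int))) : List (String × Int) :=
  (results.foldl (fun sizes result =>
      let text_length := (PySem.Dict.ofList result).getD "text_length" 0
      if text_length < 1000 then sizes.modify "small" 0 (· + 1)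
      else if text_length < 10000 then sizes.modify "medium" 0 (· + 1)
      else sizes.modify "large" 0 (· + 1))
    (((PySem.Dict.empty.insert "small" 0).insert "medium" 0).insert "large" 0)).items

-- ===== PORT B =====
-- lengths extracted once; small/medium by filtered counts; large = len - small - medium
def analyze_file_sizes_py_alt (results : List (List (String × Int))) : List (String × Int) :=
  let lengths := results.map (fun result => (PySem.Dict.ofList result).getD "text_length" 0)
  let small : Int := lengths.countP (fun n => decide (n < 1000))
  let medium : Int := lengths.countP (fun n => decide (1000 ≤ n ∧ n < 10000))
  [("small", small), ("medium", medium), ("large", (lengths.length : Int) - small - medium)]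

-- ===== PRECONDITION & SPEC =====
def Spec_analyze_file_sizes_py (results : List (List (String × Int))) (out : List (String × Int)) : Prop := out = analyze_file_sizes_py_alt results
instance (results : List (List (String × Int))) (out : List (String × Int)) : Decidable (Spec_analyze_file_sizes_py results out) := by unfold Spec_analyze_file_sizes_py; infer_instance

-- ===== CLAIM (what is proved, stated in full; the proofs are below) =====
def Claim_equal_analyze_file_sizes_py : Prop := ∀ (results : List (List (String × Int))), Dom_analyze_file_sizes_py results → Spec_analyze_file_sizes_py results (analyze_file_sizes_py results)

-- ===== LEMMAS AND PROOFS =====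

-- Loop invariant: A's dict accumulator with values a,b,c yields a+small, b+medium, c+(len-small-medium).
theorem pv_fold_eq (l : List (List (String × Int))) (a b c : Int) :
    (l.foldl (fun sizes result =>
        let text_length := (PySem.Dict.ofList result).getD "text_length" 0
        if text_length < 1000 then sizes.modify "small" 0 (· + 1)
        else if text_length < 10000 then sizes.modify "medium" 0 (· + 1)
        else sizes.modify "large" 0 (· + 1))
      (PySem.Dict.mk [("small", a), ("medium", b), ("large", c)])).items
    = (let lengths := l.map (fun result => (PySem.Dict.ofList result).getD "text_length" 0)
       let small : Int := lengths.countP (fun n => decide (n < 1000))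
       let medium : Int := lengths.countP (fun n => decide (1000 ≤ n ∧ n < 10000))
       [("small", a + small), ("medium", b + medium),
        ("large", c + ((lengths.length : Int) - small - medium))]) := by
  induction l generalizing a b c with
  | nil => simp
  | cons r l ih =>
    simp only [List.foldl_cons, List.map_cons, List.countP_cons, List.length_cons]
    set tl := (PySem.Dict.ofList r).getD "text_length" 0 with htl
    by_cases h1 : tl < 1000
    · rw [if_pos h1]
      rw [show (PySem.Dict.mk [("small", a), ("medium", b), ("large", c)]).modify "small" 0 (· + 1)
            = PySem.Dict.mk [("small", a + 1), ("medium", b), ("large", c)] by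
          simp [PySem.Dict.modify, PySem.Dict.contains, PySem.Dict.get?, PySem.Dict.insert,
                PySem.Dict.getD]]
      rw [ih]
      have hm : ¬(1000 ≤ tl ∧ tl < 10000) := by omega
      simp [h1, hm]; ring
    · by_cases h2 : tl < 10000
      · rw [if_neg h1, if_pos h2]
        rw [show (PySem.Dict.mk [("small", a), ("medium", b), ("large", c)]).modify "medium" 0 (· + 1)
              = PySem.Dict.mk [("small", a), ("medium", b + 1), ("large", c)] by
            simp [PySem.Dict.modify, PySem.Dict.contains, PySem.Dict.get?, PySem.Dict.insert,
                  PySem.Dict.getD]]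
        rw [ih]
        have hm : (1000 ≤ tl ∧ tl < 10000) := by omega
        simp [h1, hm]; ring_nf; all_goals simp
      · rw [if_neg h1, if_neg h2]
        rw [show (PySem.Dict.mk [("small", a), ("medium", b), ("large", c)]).modify "large" 0 (· + 1)
              = PySem.Dict.mk [("small", a), ("medium", b), ("large", c + 1)] by
            simp [PySem.Dict.modify, PySem.Dict.contains, PySem.Dict.get?, PySem.Dict.insert,
                  PySem.Dict.getD]]
        rw [ih]
        have hm : ¬(1000 ≤ tl ∧ tl < 10000) := by omega
        simp [h1, hm]; ring

-- ===== VERDICT (by name: the statement is the Claim_ definition above) =====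
theorem analyze_file_sizes_py_spec : Claim_equal_analyze_file_sizes_py := by
  intro results _
  unfold Spec_analyze_file_sizes_py analyze_file_sizes_py analyze_file_sizes_py_alt
  have hinit : ((PySem.Dict.empty.insert "small" (0 : Int)).insert "medium" 0).insert "large" 0
      = PySem.Dict.mk [("small", 0), ("medium", 0), ("large", 0)] := by decide
  rw [hinit, pv_fold_eq]
  simp
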